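-- pv_equiv track=rewrite | github.com/dashi296/solo-agent-shinobi | src/shinobi/mission_publish.py | parse_mission_state_fields
-- ===== SOURCE A (Python) =====
-- MISSION_STATE_MARKER = "<!-- shinobi:mission-state"
--
-- def parse_mission_state_fields(body: str) -> dict[str, str]:
--     if MISSION_STATE_MARKER not in body:
--         return {}
--
--     fields: dict[str, str] = {}
--     in_marker = False
--     for line in body.splitlines():
--         stripped = line.strip()
--         if stripped == MISSION_STATE_MARKER:
--             in_marker = True
--             continue
--         if not in_marker:
--             continue
--         if stripped == "-->":
--             break
--         key, separator, value = stripped.partition(":")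
--         if separator:
--             fields[key.strip()] = value.strip()
--     return fields
-- ===== SOURCE B (Python) =====
-- MISSION_STATE_MARKER = "<!-- shinobi:mission-state"
--
--
-- def parse_mission_state_fields(body: str) -> dict[str, str]:
--     lines = [line.strip() for line in body.splitlines()]
--     if MISSION_STATE_MARKER not in lines:
--         return {}
--     block = lines[lines.index(MISSION_STATE_MARKER) + 1 :]
--     if "-->" in block:
--         block = block[: block.index("-->")]
--     return {
--         key.strip(): value.strip()
--         for line in block
--         if line != MISSION_STATE_MARKER and ":" in line
--         for key, value in [line.split(":", 1)]
--     }
-- ===== Notes on version B (the rewrite author's own statement) =====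
-- stated objective: simpler
-- what changed: Replaces A's boolean-flag single scan by an extract-then-parse decomposition: find the marker line's index, slice out the block up to the closing comment line, and build the dict with a comprehension over that block.
import Mathlib
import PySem

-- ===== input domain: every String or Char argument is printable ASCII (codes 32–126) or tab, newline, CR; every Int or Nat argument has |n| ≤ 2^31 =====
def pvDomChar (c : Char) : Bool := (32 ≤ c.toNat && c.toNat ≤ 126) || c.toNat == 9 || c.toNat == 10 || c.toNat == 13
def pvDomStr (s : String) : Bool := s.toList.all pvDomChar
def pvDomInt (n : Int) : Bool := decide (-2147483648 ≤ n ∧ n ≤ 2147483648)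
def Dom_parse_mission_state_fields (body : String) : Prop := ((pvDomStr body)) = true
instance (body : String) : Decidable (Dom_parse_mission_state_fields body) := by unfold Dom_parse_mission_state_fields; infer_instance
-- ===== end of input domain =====

-- B replaces A's boolean-flag single scan by an extract-then-parse decomposition (locate the marker
-- line, slice the block up to '-->', parse it with a dict comprehension); objective: simpler.

def pvMarker : String := "<!-- shinobi:mission-state"

-- ===== PORT A =====
-- str.partition(":") hand-ported (PySem has no partition); exact for the one-char separator ':':
-- split at the first ':' , or (s, "", "") when there is none.
def pvPartitionColon (s : List Char) : List Char × List Char × List Char :=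
  match s.span (fun c => !(c == ':')) with
  | (k, []) => (k, [], [])
  | (k, _ :: v) => (k, [':'], v)

def pvLoopA : List String → PySem.Dict String String → Bool → PySem.Dict String String
  | [], fields, _ => fields
  | line :: rest, fields, in_marker =>
    let stripped := PySem.Str.strip line
    if stripped = pvMarker then pvLoopA rest fields true
    else if in_marker = false then pvLoopA rest fields in_marker
    else if stripped = "-->" then fields
    else
      match pvPartitionColon stripped.toList with
      | (key, sep, value) =>
        if sep ≠ [] then
          pvLoopA rest
            (fields.insert (String.ofList (PySem.Chars.strip key))
              (String.ofList (PySem.Chars.strip value))) in_marker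
        else pvLoopA rest fields in_marker

def parse_mission_state_fields (body : String) : List (String × String) :=
  if PySem.Str.isIn pvMarker body = false then []
  else (pvLoopA (PySem.Str.splitlines body) PySem.Dict.empty false).items

-- ===== PORT B =====
-- body of B's dict comprehension
def pvStepB (d : PySem.Dict String String) (line : String) : PySem.Dict String String :=
  if line ≠ pvMarker ∧ PySem.Str.isIn ":" line = true then
    match PySem.Str.splitMax? line ":" 1 with
    | some (key :: value :: _) => d.insert (PySem.Str.strip key) (PySem.Str.strip value)
    | _ => d
  else d

def parse_mission_state_fields_alt (body : String) : List (String × String) :=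
  let lines := (PySem.Str.splitlines body).map PySem.Str.strip
  match PySem.List.index? lines pvMarker with
  | none => []
  | some i =>
    let block0 := PySem.List.slice lines (some ((i : Int) + 1)) none
    let block :=
      match PySem.List.index? block0 "-->" with
      | some j => PySem.List.slice block0 none (some ((j : Int)))
      | none => block0
    (block.foldl pvStepB PySem.Dict.empty).items

-- ===== PRECONDITION & SPEC =====
def Spec_parse_mission_state_fields (body : String) (out : List (String × String)) : Prop := out = parse_mission_state_fields_alt body
instance (body : String) (out : List (String × String)) : Decidable (Spec_parse_mission_state_fields body out) := by unfold Spec_parse_mission_state_fields; infer_instance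

-- ===== CLAIM (what is proved, stated in full; the proofs are below) =====
def Claim_equal_parse_mission_state_fields : Prop := ∀ (body : String), Dom_parse_mission_state_fields body → Spec_parse_mission_state_fields body (parse_mission_state_fields body)

-- ===== LEMMAS AND PROOFS =====

-- strip yields an infix of its argument
theorem pvStripInfix (l : List Char) : PySem.Chars.strip l <:+: l := by
  unfold PySem.Chars.strip PySem.Chars.rstrip PySem.Chars.lstrip
  have h1 : (List.dropWhile PySem.Chars.isspace l) <:+ l := List.dropWhile_suffix _
  have h2 : ((List.dropWhile PySem.Chars.isspace l).reverse.dropWhile PySem.Chars.isspace).reverse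
      <+: (List.dropWhile PySem.Chars.isspace l) := by
    rw [← List.reverse_suffix]
    simpa using List.dropWhile_suffix
      (l := (List.dropWhile PySem.Chars.isspace l).reverse) PySem.Chars.isspace
  exact h2.isInfix.trans h1.isInfix

-- every line produced by splitlines.go is an already-finished line or an infix of the remaining input
theorem pvMemGo (isB : Char → Bool) (s : List Char) : ∀ cur acc (l : List Char),
    l ∈ PySem.Chars.splitlines.go isB s cur acc → l ∈ acc ∨ l <:+: (cur.reverse ++ s) := by
  induction hn : s.length using Nat.strong_induction_on generalizing s with
  | _ n ih =>
    match s with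
    | [] =>
      intro cur acc l hl
      unfold PySem.Chars.splitlines.go at hl
      split at hl <;> simp_all <;> rcases hl with h | h <;> simp [h]
    | c :: rest =>
      intro cur acc l hl
      rw [PySem.Chars.splitlines.go.eq_def] at hl
      have step : ∀ (s' : List Char) cur' acc', s'.length < n →
          l ∈ PySem.Chars.splitlines.go isB s' cur' acc' → l ∈ acc' ∨ l <:+: (cur'.reverse ++ s') :=
        fun s' cur' acc' hlt hmem => ih s'.length (hn ▸ hlt) s' rfl cur' acc' l hmem
      rcases rest with _ | ⟨c2, r⟩
      · have hl' : l ∈ (if isB c then PySem.Chars.splitlines.go isB [] [] (cur.reverse :: acc)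
            else PySem.Chars.splitlines.go isB [] (c :: cur) acc) := by
          by_cases hc : c = '\x0d' <;> simp_all
        split at hl'
        · rcases step [] [] (cur.reverse :: acc) (by simp [← hn]) hl' with h | h
          · rcases List.mem_cons.mp h with h | h
            · subst h; right; exact ⟨[], [c], by simp⟩
            · left; exact h
          · right; simp at h; simp [h]
        · rcases step [] (c :: cur) acc (by simp [← hn]) hl' with h | h
          · left; exact h
          · right; simp at h; simp [h]
      · by_cases hc : c = '\x0d' ∧ c2 = '\n'
        · obtain ⟨hc1, hc2⟩ := hc; subst hc1; subst hc2
          have hl' : l ∈ PySem.Chars.splitlines.go isB r [] (cur.reverse :: acc) := hl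
          rcases step r [] (cur.reverse :: acc) (by simp [← hn]) hl' with h | h
          · rcases List.mem_cons.mp h with h | h
            · subst h; right; exact ⟨[], '\x0d' :: '\n' :: r, by simp⟩
            · left; exact h
          · right; simp at h; exact h.trans ⟨cur.reverse ++ ['\x0d', '\n'], [], by simp⟩
        · have hl' : l ∈ (if isB c then PySem.Chars.splitlines.go isB (c2 :: r) [] (cur.reverse :: acc)
              else PySem.Chars.splitlines.go isB (c2 :: r) (c :: cur) acc) := by
            by_cases h1 : c = '\x0d' <;> by_cases h2 : c2 = '\n' <;> simp_all
          split at hl'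
          · rcases step (c2 :: r) [] (cur.reverse :: acc) (by simp [← hn]) hl' with h | h
            · rcases List.mem_cons.mp h with h | h
              · subst h; right; exact ⟨[], c :: c2 :: r, by simp⟩
              · left; exact h
            · right; simp at h; exact h.trans ⟨cur.reverse ++ [c], [], by simp⟩
          · rcases step (c2 :: r) (c :: cur) acc (by simp [← hn]) hl' with h | h
            · left; exact h
            · right; simpa using h

theorem pvSplitlinesInfix (s l : List Char) (h : l ∈ PySem.Chars.splitlines s) : l <:+: s := by
  unfold PySem.Chars.splitlines at h
  have := pvMemGo _ s [] [] l h
  simpa using this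

-- if some stripped line equals the marker, the marker occurs in body
theorem pvMarkerIsIn (body : String)
    (h : pvMarker ∈ (PySem.Str.splitlines body).map PySem.Str.strip) :
    PySem.Str.isIn pvMarker body = true := by
  rw [PySem.Str.isIn_iff_infix]
  obtain ⟨line, hline, hstrip⟩ := List.mem_map.mp h
  unfold PySem.Str.splitlines at hline
  obtain ⟨cs, hcs, hofl⟩ := List.mem_map.mp hline
  have h1 : cs <:+: body.toList := pvSplitlinesInfix _ _ hcs
  have h2 : pvMarker.toList = PySem.Chars.strip cs := by
    rw [← hstrip]; subst hofl; simp [PySem.Str.strip]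
  rw [h2]
  exact (pvStripInfix cs).trans h1

-- splitting k ++ ':' :: v at most once, with no ':' in k (fuel-generic go computation)
theorem pvGoZero (v : List Char) (acc : List (List Char)) (fuel : Nat) :
    PySem.Chars.splitOnMax.go [':'] fuel 0 v [] acc = (v :: acc).reverse := by
  rw [PySem.Chars.splitOnMax.go.eq_def]
  rcases fuel with _ | f <;> rcases v with _ | ⟨c, r⟩ <;> simp

theorem pvGoColon : ∀ (k : List Char), ':' ∉ k → ∀ (v cur : List Char) (acc : List (List Char)) (fuel : Nat),
    k.length < fuel →
    PySem.Chars.splitOnMax.go [':'] fuel 1 (k ++ ':' :: v) cur acc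
      = acc.reverse ++ [cur.reverse ++ k, v] := by
  intro k
  induction k with
  | nil =>
    intro _ v cur acc fuel hf
    rcases fuel with _ | f
    · omega
    · rw [PySem.Chars.splitOnMax.go.eq_def]
      simp [List.isPrefixOf, pvGoZero]
  | cons c k ih =>
    intro hc v cur acc fuel hf
    rcases fuel with _ | f
    · omega
    · rw [PySem.Chars.splitOnMax.go.eq_def]
      have hcne : ¬ (c = ':') := fun h => hc (by simp [h])
      simp only [List.cons_append, List.isPrefixOf]
      rw [if_neg (by norm_num), if_neg (by simp [beq_iff_eq]; exact fun h => hcne h.symm)]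
      have hk : ':' ∉ k := fun h => hc (List.mem_cons_of_mem _ h)
      have := ih hk v (c :: cur) acc f (by simp at hf ⊢; omega)
      simp_all

theorem pvSplitMaxColon (s : String) (k v : List Char) (hk : ':' ∉ k)
    (hs : s.toList = k ++ ':' :: v) :
    PySem.Str.splitMax? s ":" 1 = some [String.ofList k, String.ofList v] := by
  unfold PySem.Str.splitMax? PySem.Chars.splitMax?
  rw [hs]
  have hcol : (":" : String).toList = [':'] := by decide
  rw [hcol]
  simp only [List.isEmpty]
  unfold PySem.Chars.splitOnMax
  rw [if_neg (by norm_num)]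
  have h1 : (Int.toNat 1) = 1 := by decide
  rw [h1, pvGoColon k hk v [] [] _ (by simp)]
  simp

-- unfolding lemmas for A's loop
theorem pvLoopA_marker (r : String) (rs : List String) (d : PySem.Dict String String) (b : Bool)
    (h : PySem.Str.strip r = pvMarker) : pvLoopA (r :: rs) d b = pvLoopA rs d true := by
  simp [pvLoopA, h]

theorem pvLoopA_skip (r : String) (rs : List String) (d : PySem.Dict String String)
    (h : ¬ PySem.Str.strip r = pvMarker) : pvLoopA (r :: rs) d false = pvLoopA rs d false := by
  simp [pvLoopA, h]

set_option maxHeartbeats 1000000 in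
theorem pvArrowNeMarker : ¬ ("-->" : String) = pvMarker :=
  fun h => absurd (congrArg String.toList h) (by decide)

theorem pvLoopA_break (r : String) (rs : List String) (d : PySem.Dict String String)
    (h : PySem.Str.strip r = "-->") : pvLoopA (r :: rs) d true = d := by
  have hm : ¬ PySem.Str.strip r = pvMarker := by rw [h]; exact pvArrowNeMarker
  unfold pvLoopA
  rw [if_neg hm, if_neg (by simp), if_pos h]

theorem pvLoopA_insert (r : String) (rs : List String) (d : PySem.Dict String String)
    (k v : List Char)
    (hm : ¬ PySem.Str.strip r = pvMarker) (he : ¬ PySem.Str.strip r = "-->")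
    (hpart : pvPartitionColon (PySem.Chars.strip r.toList) = (k, [':'], v)) :
    pvLoopA (r :: rs) d true
      = pvLoopA rs (d.insert (String.ofList (PySem.Chars.strip k))
          (String.ofList (PySem.Chars.strip v))) true := by
  simp [pvLoopA, hm, he, hpart]

theorem pvLoopA_nocolon (r : String) (rs : List String) (d : PySem.Dict String String)
    (k : List Char)
    (hm : ¬ PySem.Str.strip r = pvMarker) (he : ¬ PySem.Str.strip r = "-->")
    (hpart : pvPartitionColon (PySem.Chars.strip r.toList) = (k, [], [])) :
    pvLoopA (r :: rs) d true = pvLoopA rs d true := by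
  simp [pvLoopA, hm, he, hpart]

theorem pvStepEq (r : String) (rest : List String) (d : PySem.Dict String String)
    (hm : ¬ PySem.Str.strip r = pvMarker) (he : ¬ PySem.Str.strip r = "-->") :
    pvLoopA (r :: rest) d true = pvLoopA rest (pvStepB d (PySem.Str.strip r)) true := by
  have hbr : (PySem.Str.strip r).toList = PySem.Chars.strip r.toList := by
    simp [PySem.Str.strip]
  have hiff : PySem.Str.isIn ":" (PySem.Str.strip r) = true ↔ ':' ∈ PySem.Chars.strip r.toList := by
    rw [PySem.Str.isIn_iff_infix]
    have hcl : (":" : String).toList = [':'] := by decide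
    rw [hcl, List.singleton_infix_iff, hbr]
  obtain ⟨cs, hg⟩ : ∃ cs, PySem.Chars.strip r.toList = cs := ⟨_, rfl⟩
  by_cases hcol : ':' ∈ cs
  · have hk : ':' ∉ cs.takeWhile (fun c => !(c == ':')) := by
      intro hmem
      have := List.mem_takeWhile_imp hmem
      simp at this
    obtain ⟨c0, v, hdw⟩ : ∃ c0 v, cs.dropWhile (fun c => !(c == ':')) = c0 :: v := by
      rcases hdrop : cs.dropWhile (fun c => !(c == ':')) with _ | ⟨c0, v⟩
      · rw [List.dropWhile_eq_nil_iff] at hdrop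
        have := hdrop _ hcol
        simp at this
      · exact ⟨c0, v, rfl⟩
    have hc0 : c0 = ':' := by
      have hne : cs.dropWhile (fun c => !(c == ':')) ≠ [] := by simp [hdw]
      have hhead := List.head_dropWhile_not (fun c => !(c == ':')) hne
      simp [hdw] at hhead
      exact hhead
    subst hc0
    have hsplit : (PySem.Str.strip r).toList = cs.takeWhile (fun c => !(c == ':')) ++ ':' :: v := by
      rw [hbr, hg]
      conv_lhs => rw [← List.takeWhile_append_dropWhile (p := fun c => !(c == ':')) (l := cs)]
      rw [hdw]
    have hpart : pvPartitionColon (PySem.Chars.strip r.toList)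
        = (cs.takeWhile (fun c => !(c == ':')), [':'], v) := by
      unfold pvPartitionColon
      rw [hg, List.span_eq_takeWhile_dropWhile, hdw]
    have hsm := pvSplitMaxColon (PySem.Str.strip r) _ v hk hsplit
    rw [pvLoopA_insert r rest d _ v hm he hpart]
    unfold pvStepB
    rw [if_pos ⟨hm, hiff.mpr (hg ▸ hcol)⟩, hsm]
    simp [PySem.Str.strip]
  · have hpart : pvPartitionColon (PySem.Chars.strip r.toList) = (cs, [], []) := by
      unfold pvPartitionColon
      rw [hg, List.span_eq_takeWhile_dropWhile]
      have hdnil : cs.dropWhile (fun c => !(c == ':')) = [] := by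
        rw [List.dropWhile_eq_nil_iff]
        intro x hx
        simp only [Bool.not_eq_eq_eq_not, Bool.not_true, beq_eq_false_iff_ne, ne_eq]
        exact fun hxc => hcol (hxc ▸ hx)
      have ht : cs.takeWhile (fun c => !(c == ':')) = cs := by
        rw [List.takeWhile_eq_self_iff]
        intro x hx
        simp only [Bool.not_eq_eq_eq_not, Bool.not_true, beq_eq_false_iff_ne, ne_eq]
        exact fun hxc => hcol (hxc ▸ hx)
      rw [hdnil, ht]
    rw [pvLoopA_nocolon r rest d cs hm he hpart]
    unfold pvStepB
    rw [if_neg (by intro hconj; exact hcol (hg ▸ hiff.mp hconj.2))]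

-- the block B folds over: lines up to the first '-->'
def pvBlockOf (L : List String) : List String :=
  match PySem.List.index? L "-->" with
  | some j => L.take j
  | none => L

theorem pvBlockOfCons (s : String) (L : List String) (hs : s ≠ "-->") :
    pvBlockOf (s :: L) = s :: pvBlockOf L := by
  unfold pvBlockOf PySem.List.index?
  rw [List.idxOf?_cons]
  simp only [beq_iff_eq, hs, if_false]
  cases h : List.idxOf? "-->" L <;> simp [h, PySem.List.index?]

-- phase 2: A's in-marker scan is B's fold over the block
theorem pvPhase2 (raw : List String) : ∀ d,
    pvLoopA raw d true = (pvBlockOf (raw.map PySem.Str.strip)).foldl pvStepB d := by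
  induction raw with
  | nil => intro d; simp [pvLoopA, pvBlockOf, PySem.List.index?]
  | cons r rs ih =>
    intro d
    by_cases he : PySem.Str.strip r = "-->"
    · rw [pvLoopA_break r rs d he]
      simp only [List.map_cons, he]
      unfold pvBlockOf PySem.List.index?
      rw [List.idxOf?_cons]
      simp
    · by_cases hmk : PySem.Str.strip r = pvMarker
      · rw [pvLoopA_marker r rs d true hmk, ih d]
        simp only [List.map_cons]
        rw [pvBlockOfCons _ _ he, List.foldl_cons]
        have : pvStepB d (PySem.Str.strip r) = d := by
          unfold pvStepB
          rw [if_neg (by intro ⟨h1, _⟩; exact h1 hmk)]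
        rw [this]
      · rw [pvStepEq r rs d hmk he, ih]
        simp only [List.map_cons]
        rw [pvBlockOfCons _ _ he, List.foldl_cons]

-- phase 1: A's pre-marker scan is a search for the first marker line
theorem pvPhase1 (raw : List String) : ∀ d,
    pvLoopA raw d false =
      (match PySem.List.index? (raw.map PySem.Str.strip) pvMarker with
       | none => d
       | some i => pvLoopA (raw.drop (i + 1)) d true) := by
  induction raw with
  | nil => intro d; simp [pvLoopA, PySem.List.index?]
  | cons r rs ih =>
    intro d
    simp only [List.map_cons]
    unfold PySem.List.index?
    rw [List.idxOf?_cons]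
    by_cases hmk : PySem.Str.strip r = pvMarker
    · rw [pvLoopA_marker r rs d false hmk]
      simp [hmk]
    · rw [pvLoopA_skip r rs d hmk, ih d]
      unfold PySem.List.index?
      rw [if_neg (by simpa using hmk)]
      cases h : List.idxOf? pvMarker (rs.map PySem.Str.strip) with
      | none => simp [h]
      | some i => simp [h]

-- ===== VERDICT (by name: the statement is the Claim_ definition above) =====
theorem parse_mission_state_fields_spec : Claim_equal_parse_mission_state_fields := by
  intro body _
  unfold Spec_parse_mission_state_fields parse_mission_state_fields parse_mission_state_fields_alt
  by_cases hin : PySem.Str.isIn pvMarker body = false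
  · rw [if_pos hin]
    have hnone : List.idxOf? pvMarker ((PySem.Str.splitlines body).map PySem.Str.strip) = none := by
      rw [List.idxOf?_eq_none_iff]
      intro hmem
      rw [pvMarkerIsIn body hmem] at hin
      exact absurd hin (by simp)
    simp only [PySem.List.index?, hnone]
  · rw [if_neg hin]
    rw [pvPhase1]
    simp only [PySem.List.index?]
    cases hidx : List.idxOf? pvMarker ((PySem.Str.splitlines body).map PySem.Str.strip) with
    | none => rfl
    | some i =>
      dsimp only
      rw [pvPhase2]
      have hb0 : PySem.List.slice ((PySem.Str.splitlines body).map PySem.Str.strip)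
          (some ((i : Int) + 1)) none
          = ((PySem.Str.splitlines body).drop (i + 1)).map PySem.Str.strip := by
        rw [PySem.List.slice_from _ (by positivity), List.map_drop]
        norm_num
      simp only [hb0]
      unfold pvBlockOf
      simp only [PySem.List.index?]
      cases hj : List.idxOf? "-->" (((PySem.Str.splitlines body).drop (i + 1)).map PySem.Str.strip) with
      | none => dsimp only
      | some j =>
        dsimp only
        rw [PySem.List.slice_to _ (by positivity : (0:Int) ≤ (j : Int))]
        norm_num
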